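-- pv_equiv track=rewrite | github.com/Afeef-crypto/GRADE | src/autograder/rag_extract.py | normalize_ocr_text
-- ===== SOURCE A (Python) =====
-- from typing import Any, Callable, Dict, List, Optional
--
-- def normalize_ocr_text(text: str) -> str:
--     """Collapse noisy OCR whitespace; keep paragraph breaks where possible."""
--     text = text.replace("\r\n", "\n").replace("\r", "\n")
--     lines = [ln.strip() for ln in text.split("\n")]
--     # Drop empty runs but keep single blank between paragraphs
--     out: List[str] = []
--     prev_empty = False
--     for ln in lines:
--         if not ln:
--             if not prev_empty and out:
--                 prev_empty = True
--             continue
--         if prev_empty and out: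
--             out.append("")
--         prev_empty = False
--         out.append(ln)
--     return "\n".join(out).strip()
-- ===== SOURCE B (Python) =====
-- def normalize_ocr_text(text: str) -> str:
--     """Collapse noisy OCR whitespace; keep paragraph breaks where possible."""
--     lines = [ln.strip() for ln in text.replace("\r\n", "\n").replace("\r", "\n").split("\n")]
--     paragraphs = []
--     current = []
--     for ln in lines:
--         if ln:
--             current.append(ln)
--         elif current:
--             paragraphs.append(current)
--             current = []
--     if current:
--         paragraphs.append(current)
--     return "\n\n".join("\n".join(p) for p in paragraphs)
-- ===== Notes on version B (the rewrite author's own statement) =====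
-- stated objective: simpler
-- what changed: Replaces A's stateful prev_empty flag loop that injects empty-string separators into a flat line list (followed by a final strip) with a paragraph decomposition: group consecutive non-blank stripped lines into paragraphs and join the paragraphs with a blank line, no flag and no final strip needed.
import Mathlib
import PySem

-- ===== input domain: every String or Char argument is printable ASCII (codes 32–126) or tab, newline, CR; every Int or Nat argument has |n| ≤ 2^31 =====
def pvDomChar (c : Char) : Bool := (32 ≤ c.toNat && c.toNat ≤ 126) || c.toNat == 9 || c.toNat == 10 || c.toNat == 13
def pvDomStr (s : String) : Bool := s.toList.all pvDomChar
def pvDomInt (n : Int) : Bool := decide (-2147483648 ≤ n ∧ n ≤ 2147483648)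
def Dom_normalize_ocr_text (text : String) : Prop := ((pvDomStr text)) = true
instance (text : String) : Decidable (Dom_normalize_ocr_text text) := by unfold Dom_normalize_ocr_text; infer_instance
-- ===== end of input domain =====

-- B replaces A's prev_empty-flag loop (flat line list with injected "" separators, then strip)
-- by grouping non-blank lines into paragraphs joined with a blank line; objective: simpler.

-- ===== PORT A =====
-- A's loop body: state = (out, prev_empty)
def pvStepA (st : List (List Char) × Bool) (ln : List Char) : List (List Char) × Bool :=
  if ln.isEmpty then
    (st.1, if !st.2 && !st.1.isEmpty then true else st.2)
  else
    ((if st.2 && !st.1.isEmpty then st.1 ++ [[]] else st.1) ++ [ln], false)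

def normalize_ocr_text (text : String) : String :=
  let t := PySem.Chars.replace (PySem.Chars.replace text.toList ['\r', '\n'] ['\n']) ['\r'] ['\n']
  let lines := (PySem.Chars.splitOn t ['\n']).map PySem.Chars.strip
  let st := lines.foldl pvStepA ([], false)
  String.mk (PySem.Chars.strip (PySem.Chars.join ['\n'] st.1))

-- ===== PORT B =====
-- B's loop body: state = (paragraphs, current)
def pvStepB (st : List (List (List Char)) × List (List Char)) (ln : List Char) :
    List (List (List Char)) × List (List Char) :=
  if !ln.isEmpty then (st.1, st.2 ++ [ln])
  else if !st.2.isEmpty then (st.1 ++ [st.2], []) else st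

def normalize_ocr_text_alt (text : String) : String :=
  let t := PySem.Chars.replace (PySem.Chars.replace text.toList ['\r', '\n'] ['\n']) ['\r'] ['\n']
  let lines := (PySem.Chars.splitOn t ['\n']).map PySem.Chars.strip
  let st := lines.foldl pvStepB ([], [])
  let paragraphs := if !st.2.isEmpty then st.1 ++ [st.2] else st.1
  String.mk (PySem.Chars.join ['\n', '\n'] (paragraphs.map (PySem.Chars.join ['\n'])))

-- ===== PRECONDITION & SPEC =====
def Spec_normalize_ocr_text (text : String) (out : String) : Prop := out = normalize_ocr_text_alt text
instance (text : String) (out : String) : Decidable (Spec_normalize_ocr_text text out) := by unfold Spec_normalize_ocr_text; infer_instance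

-- ===== CLAIM (what is proved, stated in full; the proofs are below) =====
def Claim_equal_normalize_ocr_text : Prop := ∀ (text : String), Dom_normalize_ocr_text text → Spec_normalize_ocr_text text (normalize_ocr_text text)

-- ===== LEMMAS AND PROOFS =====

-- A's out list, reconstructed from B's state: paragraphs separated by a [] line, then current
def pvSepJoin : List (List (List Char)) → List (List Char)
  | [] => []
  | [p] => p
  | p :: q :: r => p ++ [[]] ++ pvSepJoin (q :: r)

def pvInterp (ps : List (List (List Char))) (cur : List (List Char)) : List (List Char) :=
  pvSepJoin (ps ++ if cur.isEmpty then [] else [cur])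

theorem pvSepJoin_append_single (ps : List (List (List Char))) (c : List (List Char)) :
    pvSepJoin (ps ++ [c]) = if ps = [] then c else pvSepJoin ps ++ [[]] ++ c := by
  induction ps with
  | nil => simp [pvSepJoin]
  | cons p ps ih =>
    cases ps with
    | nil => simp [pvSepJoin]
    | cons q r =>
      rw [if_neg (by simp)]
      have e : pvSepJoin ((p :: q :: r) ++ [c]) = p ++ [[]] ++ pvSepJoin ((q :: r) ++ [c]) := rfl
      rw [e, ih, if_neg (by simp)]
      simp [pvSepJoin]

theorem pvSepJoin_ne_nil (ps : List (List (List Char))) (h : ps ≠ [])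
    (hall : ∀ p ∈ ps, p ≠ []) : pvSepJoin ps ≠ [] := by
  cases ps with
  | nil => exact absurd rfl h
  | cons p q =>
    cases q with
    | nil => simpa [pvSepJoin] using hall p (by simp)
    | cons a b => simp [pvSepJoin]

-- bisimulation between A's fold state and B's fold state
theorem pv_sim (lines : List (List Char)) :
    ∀ (ps : List (List (List Char))) (cur : List (List Char)),
    (∀ p ∈ ps, p ≠ []) → (∀ l ∈ cur, l ≠ []) →
    lines.foldl pvStepA (pvInterp ps cur, decide (ps ≠ [] ∧ cur = [])) =
      (pvInterp (lines.foldl pvStepB (ps, cur)).1 (lines.foldl pvStepB (ps, cur)).2,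
       decide ((lines.foldl pvStepB (ps, cur)).1 ≠ [] ∧ (lines.foldl pvStepB (ps, cur)).2 = [])) := by
  induction lines with
  | nil => intro ps cur hps hcur; simp
  | cons ln rest ih =>
    intro ps cur hps hcur
    by_cases hln : ln = []
    · -- blank line
      subst hln
      by_cases hc : cur = []
      · subst hc
        have hA : pvStepA (pvInterp ps [], decide (ps ≠ [] ∧ ([] : List (List Char)) = [])) [] =
            (pvInterp ps [], decide (ps ≠ [] ∧ ([] : List (List Char)) = [])) := by
          by_cases hp : ps = []
          · subst hp; simp [pvStepA, pvInterp, pvSepJoin]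
          · simp [pvStepA, hp]
        have hB : pvStepB (ps, ([] : List (List Char))) [] = (ps, []) := by
          simp [pvStepB]
        rw [List.foldl_cons, List.foldl_cons, hA, hB]
        exact ih ps [] hps hcur
      · have hA : pvStepA (pvInterp ps cur, decide (ps ≠ [] ∧ cur = [])) [] =
            (pvInterp (ps ++ [cur]) [], decide ((ps ++ [cur]) ≠ [] ∧ ([] : List (List Char)) = [])) := by
          have hout : pvInterp ps cur ≠ [] := by
            unfold pvInterp
            rw [if_neg (by simpa using hc), pvSepJoin_append_single]
            split_ifs with hp
            · exact hc
            · simp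
          have : pvInterp (ps ++ [cur]) [] = pvInterp ps cur := by
            simp [pvInterp, hc]
          simp [pvStepA, hout, hc, this]
        have hB : pvStepB (ps, cur) [] = (ps ++ [cur], []) := by
          simp [pvStepB, hc]
        rw [List.foldl_cons, List.foldl_cons, hA, hB]
        exact ih (ps ++ [cur]) []
          (by intro p hp; rcases List.mem_append.1 hp with h | h
              · exact hps p h
              · simp at h; subst h; exact hc)
          (by intro l hl; simp at hl)
    · -- non-blank line
      have hA : pvStepA (pvInterp ps cur, decide (ps ≠ [] ∧ cur = [])) ln =
          (pvInterp ps (cur ++ [ln]), decide (ps ≠ [] ∧ (cur ++ [ln]) = [])) := by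
        by_cases hc : cur = []
        · subst hc
          by_cases hp : ps = []
          · subst hp; simp [pvStepA, pvInterp, pvSepJoin, hln]
          · have hout : pvInterp ps [] ≠ [] := by
              simpa [pvInterp] using pvSepJoin_ne_nil ps hp hps
            have : pvInterp ps [] ++ [[]] ++ [ln] = pvInterp ps [ln] := by
              have e0 : pvInterp ps [] = pvSepJoin ps := by simp [pvInterp]
              have e1 : pvInterp ps [ln] = pvSepJoin (ps ++ [[ln]]) := by simp [pvInterp]
              rw [e0, e1, pvSepJoin_append_single, if_neg hp]
            simp [pvStepA, hln, hp, hout, List.isEmpty_iff, this]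
        · have : pvInterp ps cur ++ [ln] = pvInterp ps (cur ++ [ln]) := by
            have h1 : pvInterp ps cur = pvSepJoin (ps ++ [cur]) := by
              simp [pvInterp, hc]
            have h2 : pvInterp ps (cur ++ [ln]) = pvSepJoin (ps ++ [cur ++ [ln]]) := by
              simp [pvInterp]
            rw [h1, h2, pvSepJoin_append_single, pvSepJoin_append_single]
            split_ifs with hp <;> simp
          simp [pvStepA, hln, hc, this]
      have hB : pvStepB (ps, cur) ln = (ps, cur ++ [ln]) := by
        simp [pvStepB, hln]
      rw [List.foldl_cons, List.foldl_cons, hA, hB]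
      exact ih ps (cur ++ [ln]) hps
        (by intro l hl; rcases List.mem_append.1 hl with h | h
            · exact hcur l h
            · simp at h; subst h; exact hln)

-- B's fold keeps only nonempty paragraphs of nonempty stripped lines
def pvInvB (st : List (List (List Char)) × List (List Char)) : Prop :=
  (∀ p ∈ st.1, p ≠ [] ∧ ∀ l ∈ p, l ≠ [] ∧ PySem.Chars.strip l = l) ∧
  (∀ l ∈ st.2, l ≠ [] ∧ PySem.Chars.strip l = l)

theorem pv_invB (lines : List (List Char)) :
    ∀ (ps : List (List (List Char))) (cur : List (List Char)),
    (∀ l ∈ lines, PySem.Chars.strip l = l) → pvInvB (ps, cur) →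
    pvInvB (lines.foldl pvStepB (ps, cur)) := by
  induction lines with
  | nil => intro ps cur _ h; exact h
  | cons ln rest ih =>
    intro ps cur hlines hinv
    obtain ⟨hps, hcur⟩ := hinv
    have hrest : ∀ l ∈ rest, PySem.Chars.strip l = l := fun l hl => hlines l (by simp [hl])
    by_cases hln : ln = []
    · subst hln
      by_cases hc : cur = []
      · subst hc
        have hB : pvStepB (ps, ([] : List (List Char))) [] = (ps, []) := by simp [pvStepB]
        simp only [List.foldl_cons, hB]
        exact ih ps [] hrest ⟨hps, hcur⟩
      · have hB : pvStepB (ps, cur) [] = (ps ++ [cur], []) := by simp [pvStepB, hc]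
        simp only [List.foldl_cons, hB]
        refine ih (ps ++ [cur]) [] hrest ⟨?_, by intro l hl; simp at hl⟩
        intro p hp
        rcases List.mem_append.1 hp with h | h
        · exact hps p h
        · simp at h; subst h; exact ⟨hc, hcur⟩
    · have hB : pvStepB (ps, cur) ln = (ps, cur ++ [ln]) := by
        simp [pvStepB, hln]
      simp only [List.foldl_cons, hB]
      refine ih ps (cur ++ [ln]) hrest ⟨hps, ?_⟩
      intro l hl
      rcases List.mem_append.1 hl with h | h
      · exact hcur l h
      · simp at h; subst h; exact ⟨hln, hlines _ (by simp)⟩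

-- a list whose first and last characters are non-space
def pvGood (l : List Char) : Prop :=
  l ≠ [] ∧ (∀ c, l.head? = some c → PySem.Chars.isspace c = false) ∧
    (∀ c, l.reverse.head? = some c → PySem.Chars.isspace c = false)

theorem pv_lstrip_head (s : List Char) (c : Char) (h : (PySem.Chars.lstrip s).head? = some c) :
    PySem.Chars.isspace c = false := by
  have := List.head?_dropWhile_not PySem.Chars.isspace s
  unfold PySem.Chars.lstrip at h
  rw [h] at this
  exact this

theorem pv_good_of_strip (s : List Char) (h : PySem.Chars.strip s ≠ []) :
    pvGood (PySem.Chars.strip s) := by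
  refine ⟨h, ?_, ?_⟩
  · -- head of strip s = head of lstrip s (strip s is a nonempty prefix of lstrip s)
    intro c hc
    have hpre : PySem.Chars.strip s <+: PySem.Chars.lstrip s := by
      unfold PySem.Chars.strip PySem.Chars.rstrip
      have := List.dropWhile_suffix (l := (PySem.Chars.lstrip s).reverse) PySem.Chars.isspace
      rcases this with ⟨u, hu⟩
      exact ⟨u.reverse, by
        have := congrArg List.reverse hu
        simpa [List.reverse_append] using this⟩
    rcases hpre with ⟨u, hu⟩
    have : (PySem.Chars.lstrip s).head? = some c := by
      rw [← hu]
      cases hst : PySem.Chars.strip s with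
      | nil => exact absurd hst h
      | cons a t => rw [hst] at hc; simp at hc; subst hc; simp
    exact pv_lstrip_head s c this
  · intro c hc
    unfold PySem.Chars.strip PySem.Chars.rstrip at hc
    rw [List.reverse_reverse] at hc
    have := List.head?_dropWhile_not PySem.Chars.isspace (PySem.Chars.lstrip s).reverse
    rw [hc] at this
    exact this

theorem pv_strip_of_good (l : List Char) (h : pvGood l) : PySem.Chars.strip l = l := by
  obtain ⟨hne, hh, ht⟩ := h
  have hl : PySem.Chars.lstrip l = l := by
    cases l with
    | nil => rfl
    | cons a t =>
      have : PySem.Chars.isspace a = false := hh a (by simp)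
      simp [PySem.Chars.lstrip, this]
  have hr : PySem.Chars.rstrip l = l := by
    cases hrev : l.reverse with
    | nil => simp at hrev; subst hrev; rfl
    | cons a t =>
      have : PySem.Chars.isspace a = false := ht a (by simp [hrev])
      unfold PySem.Chars.rstrip
      rw [hrev, List.dropWhile_cons, this]
      simp [← hrev]
  unfold PySem.Chars.strip
  rw [hl, hr]

theorem pv_strip_idem (s : List Char) :
    PySem.Chars.strip (PySem.Chars.strip s) = PySem.Chars.strip s := by
  by_cases h : PySem.Chars.strip s = []
  · rw [h]; rfl
  · exact pv_strip_of_good _ (pv_good_of_strip s h)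

theorem pv_good_append (sep a b : List Char) (ha : pvGood a) (hb : pvGood b) :
    pvGood (a ++ sep ++ b) := by
  obtain ⟨hane, hah, _⟩ := ha
  obtain ⟨hbne, _, hbt⟩ := hb
  refine ⟨by simp [hane], ?_, ?_⟩
  · intro c hc
    apply hah c
    cases a with
    | nil => exact absurd rfl hane
    | cons x t => simpa using hc
  · intro c hc
    apply hbt c
    rw [List.reverse_append, List.reverse_append] at hc
    cases hrev : b.reverse with
    | nil => simp at hrev; exact absurd hrev hbne
    | cons x t => rw [hrev] at hc; simpa [hrev] using hc

theorem pv_good_join (sep : List Char) (p : List (List Char)) (hp : p ≠ [])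
    (hl : ∀ l ∈ p, pvGood l) : pvGood (PySem.Chars.join sep p) := by
  induction p with
  | nil => exact absurd rfl hp
  | cons x t ih =>
    cases t with
    | nil => simpa [PySem.Chars.join, List.intercalate] using hl x (by simp)
    | cons y r =>
      rw [PySem.Chars.join_cons_cons]
      exact pv_good_append sep x _ (hl x (by simp))
        (ih (by simp) (fun l hml => hl l (by simp [hml])))

-- join with sep distributes over ++ of nonempty chunk lists
theorem pv_join_append (sep : List Char) (a b : List (List Char)) (ha : a ≠ []) (hb : b ≠ []) :
    PySem.Chars.join sep (a ++ b) = PySem.Chars.join sep a ++ sep ++ PySem.Chars.join sep b := by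
  induction a with
  | nil => exact absurd rfl ha
  | cons x t ih =>
    cases t with
    | nil =>
      cases b with
      | nil => exact absurd rfl hb
      | cons y r => simp [PySem.Chars.join_cons_cons, PySem.Chars.join_singleton]
    | cons y r =>
      have : ((x :: y :: r) ++ b) = x :: ((y :: r) ++ b) := by simp
      rw [this]
      have hcons : ((y :: r) ++ b) = y :: (r ++ b) := by simp
      rw [hcons, PySem.Chars.join_cons_cons, PySem.Chars.join_cons_cons, ← hcons,
        ih (by simp) ]
      simp

-- "\n".join of the blank-separated flat list = "\n\n".join of the per-paragraph joins
theorem pv_join_sepJoin (P : List (List (List Char))) (hP : ∀ p ∈ P, p ≠ []) :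
    PySem.Chars.join ['\n'] (pvSepJoin P) =
      PySem.Chars.join ['\n', '\n'] (P.map (PySem.Chars.join ['\n'])) := by
  induction P with
  | nil => rfl
  | cons p t ih =>
    cases t with
    | nil => simp [pvSepJoin]
    | cons q r =>
      have hS : pvSepJoin (q :: r) ≠ [] :=
        pvSepJoin_ne_nil _ (by simp) (fun x hx => hP x (by simp [hx]))
      have hq : p ≠ [] := hP p (by simp)
      calc PySem.Chars.join ['\n'] (pvSepJoin (p :: q :: r))
          = PySem.Chars.join ['\n'] (p ++ ([[]] ++ pvSepJoin (q :: r))) := by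
            simp [pvSepJoin]
        _ = PySem.Chars.join ['\n'] p ++ ['\n'] ++
              PySem.Chars.join ['\n'] ([[]] ++ pvSepJoin (q :: r)) :=
            pv_join_append _ _ _ hq (by simp)
        _ = PySem.Chars.join ['\n'] p ++ ['\n'] ++
              (PySem.Chars.join ['\n'] [[]] ++ ['\n'] ++
                PySem.Chars.join ['\n'] (pvSepJoin (q :: r))) := by
            rw [pv_join_append _ _ _ (by simp) hS]
        _ = PySem.Chars.join ['\n'] p ++ ['\n', '\n'] ++
              PySem.Chars.join ['\n', '\n'] ((q :: r).map (PySem.Chars.join ['\n'])) := by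
            rw [ih (fun x hx => hP x (by simp [hx])), PySem.Chars.join_singleton]
            simp
        _ = PySem.Chars.join ['\n', '\n'] ((p :: q :: r).map (PySem.Chars.join ['\n'])) := by
            simp [List.map_cons, PySem.Chars.join_cons_cons]

-- everything after the shared line-splitting, as one statement about the line list
theorem pv_main (lines : List (List Char)) (h : ∀ l ∈ lines, PySem.Chars.strip l = l) :
    PySem.Chars.strip (PySem.Chars.join ['\n'] (lines.foldl pvStepA ([], false)).1) =
      PySem.Chars.join ['\n', '\n']
        ((if !(lines.foldl pvStepB ([], [])).2.isEmpty then
            (lines.foldl pvStepB ([], [])).1 ++ [(lines.foldl pvStepB ([], [])).2]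
          else (lines.foldl pvStepB ([], [])).1).map (PySem.Chars.join ['\n'])) := by
  have hsim := pv_sim lines [] [] (by simp) (by simp)
  have e1 : ((pvInterp [] [], decide (([] : List (List (List Char))) ≠ [] ∧ ([] : List (List Char)) = [])))
      = (([] : List (List Char)), false) := by
    simp [pvInterp, pvSepJoin]
  rw [e1] at hsim
  have hinv := pv_invB lines [] [] h ⟨by intro p hp; simp at hp, by intro l hl; simp at hl⟩
  set stB := lines.foldl pvStepB ([], []) with hstB
  obtain ⟨hP1, hP2⟩ := hinv
  set P : List (List (List Char)) := stB.1 ++ if stB.2.isEmpty then [] else [stB.2] with hPdef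
  have hparas : (if !stB.2.isEmpty then stB.1 ++ [stB.2] else stB.1) = P := by
    by_cases hc : stB.2 = [] <;> simp [hPdef, hc]
  have hPne : ∀ p ∈ P, p ≠ [] := by
    intro p hp
    rw [hPdef] at hp
    rcases List.mem_append.1 hp with hmem | hmem
    · exact (hP1 p hmem).1
    · by_cases hc : stB.2 = []
      · simp [hc] at hmem
      · simp [hc] at hmem; subst hmem; exact hc
  have hPlines : ∀ p ∈ P, ∀ l ∈ p, l ≠ [] ∧ PySem.Chars.strip l = l := by
    intro p hp
    rw [hPdef] at hp
    rcases List.mem_append.1 hp with hmem | hmem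
    · exact (hP1 p hmem).2
    · by_cases hc : stB.2 = []
      · simp [hc] at hmem
      · simp [hc] at hmem; subst hmem; exact hP2
  have hA1 : (lines.foldl pvStepA ([], false)).1 = pvSepJoin P := by
    rw [hsim, hPdef]; rfl
  rw [hA1, hparas, pv_join_sepJoin P hPne]
  -- the final strip is a no-op
  cases hPnil : P with
  | nil => rfl
  | cons p rest =>
    apply pv_strip_of_good
    apply pv_good_join
    · simp
    · intro l hl
      rcases List.mem_map.1 hl with ⟨q, hq, rfl⟩
      rw [← hPnil] at hq
      refine pv_good_join _ q (hPne q hq) ?_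
      intro x hx
      obtain ⟨hxne, hxs⟩ := hPlines q hq x hx
      have := pv_good_of_strip x (by rw [hxs]; exact hxne)
      rwa [hxs] at this

-- ===== VERDICT (by name: the statement is the Claim_ definition above) =====
theorem normalize_ocr_text_spec : Claim_equal_normalize_ocr_text := by
  intro text _
  show normalize_ocr_text text = normalize_ocr_text_alt text
  exact congrArg String.mk
    (pv_main _ (by intro l hl; rcases List.mem_map.1 hl with ⟨s, _, rfl⟩; exact pv_strip_idem s))
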